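-- pv_equiv track=rewrite | github.com/dock108dev/sports-data-admin-util | api/app/services/chapters/game_quality.py | count_lead_changes
-- ===== SOURCE A (Python) =====
-- def count_lead_changes(score_history: list[dict[str, int]]) -> int:
--     """Count the number of lead changes in a game.
--
--     A lead change occurs when the leading team switches.
--     Ties do not count as lead changes.
--
--     Args:
--         score_history: List of score snapshots with "home" and "away" keys.
--                        Must be in chronological order.
--                        Example: [{"home": 0, "away": 0}, {"home": 2, "away": 0}, ...]
--
--     Returns:
--         Number of lead changes (int >= 0)
--     """
--     if not score_history:
--         return 0
--
--     lead_changes = 0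
--     current_leader: str | None = None  # "home", "away", or None (tied)
--
--     for score in score_history:
--         home = score.get("home", 0) or 0
--         away = score.get("away", 0) or 0
--
--         # Determine current leader
--         if home > away:
--             new_leader = "home"
--         elif away > home:
--             new_leader = "away"
--         else:
--             new_leader = None  # Tied
--
--         # Count lead change only when leader SWITCHES (not from/to tie)
--         # A lead change requires going from one team leading to the other
--         if (
--             current_leader is not None
--             and new_leader is not None
--             and current_leader != new_leader
--         ):
--             lead_changes += 1
--
--         # Update current leader (even if tied)
--         if new_leader is not None:
--             current_leader = new_leader
--
--     return lead_changes
-- ===== SOURCE B (Python) =====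
-- def count_lead_changes(score_history: list[dict[str, int]]) -> int:
--     leaders = []
--     for score in score_history:
--         home = score.get("home", 0) or 0
--         away = score.get("away", 0) or 0
--         if home > away:
--             leaders.append("home")
--         elif away > home:
--             leaders.append("away")
--         # ties are dropped entirely
--     return sum(x != y for x, y in zip(leaders, leaders[1:]))
-- ===== Notes on version B (the rewrite author's own statement) =====
-- stated objective: alternative
-- what changed: Replaces the single stateful pass (running leader + change counter) by a two-phase build-then-reduce: map each snapshot to its leader, drop ties, then sum adjacent differing pairs of the tie-stripped leader sequence.
import Mathlib
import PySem

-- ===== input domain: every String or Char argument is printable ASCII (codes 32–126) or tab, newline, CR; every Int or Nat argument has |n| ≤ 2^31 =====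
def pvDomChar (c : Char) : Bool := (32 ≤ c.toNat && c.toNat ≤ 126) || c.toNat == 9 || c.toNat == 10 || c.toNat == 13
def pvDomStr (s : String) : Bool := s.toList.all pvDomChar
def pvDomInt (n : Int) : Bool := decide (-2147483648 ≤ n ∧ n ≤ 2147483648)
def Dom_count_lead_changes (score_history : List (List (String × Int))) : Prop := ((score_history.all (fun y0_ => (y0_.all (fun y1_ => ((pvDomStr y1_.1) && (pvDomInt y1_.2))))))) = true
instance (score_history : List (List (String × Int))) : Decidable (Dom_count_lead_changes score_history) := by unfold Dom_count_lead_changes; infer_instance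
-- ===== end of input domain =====

-- B replaces A's single stateful pass by building the tie-stripped leader list and summing
-- adjacent differing pairs (a different decomposition, same O(n) cost; return value only).

-- ===== PORT A =====
-- A's loop body; `score.get(k, 0) or 0` is the identity on Int values (only 0 is falsy), ported as getD.
def pvStepA (st : Int × Option String) (score : List (String × Int)) : Int × Option String :=
  let home := PySem.Dict.getD (PySem.Dict.mk score) "home" (0 : Int)
  let away := PySem.Dict.getD (PySem.Dict.mk score) "away" (0 : Int)
  let new_leader : Option String :=
    if home > away then some "home" else if away > home then some "away" else none
  let lead_changes :=
    match st.2, new_leader with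
    | some cl, some nl => if cl ≠ nl then st.1 + 1 else st.1
    | _, _ => st.1
  let current_leader := if new_leader.isSome then new_leader else st.2
  (lead_changes, current_leader)

def count_lead_changes (score_history : List (List (String × Int))) : Int :=
  if score_history = [] then 0
  else (score_history.foldl pvStepA ((0 : Int), (none : Option String))).1

-- ===== PORT B =====
-- leader of one snapshot ("home"/"away", none on a tie); same `or 0` note as above.
def pvLeader (score : List (String × Int)) : Option String :=
  let home := PySem.Dict.getD (PySem.Dict.mk score) "home" (0 : Int)
  let away := PySem.Dict.getD (PySem.Dict.mk score) "away" (0 : Int)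
  if home > away then some "home" else if away > home then some "away" else none

def count_lead_changes_alt (score_history : List (List (String × Int))) : Int :=
  let leaders := score_history.filterMap pvLeader
  (((leaders.zip leaders.tail).map (fun p => if p.1 ≠ p.2 then (1 : Int) else 0)).sum)

-- ===== PRECONDITION & SPEC =====
def Spec_count_lead_changes (score_history : List (List (String × Int))) (out : Int) : Prop := out = count_lead_changes_alt score_history
instance (score_history : List (List (String × Int))) (out : Int) : Decidable (Spec_count_lead_changes score_history out) := by unfold Spec_count_lead_changes; infer_instance

-- ===== CLAIM (what is proved, stated in full; the proofs are below) =====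
def Claim_equal_count_lead_changes : Prop := ∀ (score_history : List (List (String × Int))), Dom_count_lead_changes score_history → Spec_count_lead_changes score_history (count_lead_changes score_history)

-- ===== LEMMAS AND PROOFS =====

-- number of adjacent differing pairs, as a structural recursion
def pvPc : List String → Int
  | [] => 0
  | [_] => 0
  | x :: y :: t => (if x ≠ y then (1 : Int) else 0) + pvPc (y :: t)

lemma pvZipsum_eq_pc (l : List String) :
    ((l.zip l.tail).map (fun p => if p.1 ≠ p.2 then (1 : Int) else 0)).sum = pvPc l := by
  match l with
  | [] => simp [pvPc]
  | [x] => simp [pvPc]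
  | x :: y :: t =>
    have ih := pvZipsum_eq_pc (y :: t)
    simp only [List.tail_cons, List.zip_cons_cons, List.map_cons, List.sum_cons, pvPc] at *
    omega

lemma pvStepA_eq (st : Int × Option String) (score : List (String × Int)) :
    pvStepA st score =
      (match st.2, pvLeader score with
        | some cl, some nl => if cl ≠ nl then st.1 + 1 else st.1
        | _, _ => st.1,
       if (pvLeader score).isSome then pvLeader score else st.2) := by
  simp [pvStepA, pvLeader]

lemma pvFold_eq (xs : List (List (String × Int))) : ∀ (c : Int) (opt : Option String),
    (xs.foldl pvStepA (c, opt)).1 = c + pvPc (opt.toList ++ xs.filterMap pvLeader) := by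
  induction xs with
  | nil => intro c opt; cases opt <;> simp [pvPc]
  | cons x xs ih =>
    intro c opt
    rw [List.foldl_cons, pvStepA_eq]
    cases h : pvLeader x with
    | none =>
      cases opt <;> simp only [Option.isSome_none, Bool.false_eq_true, if_false] <;>
        simp [h, ih]
    | some nl =>
      cases opt with
      | none =>
        simp only [Option.isSome_some, if_true]
        simp [h, ih]
      | some cl =>
        simp only [Option.isSome_some, if_true]
        have := ih (if cl ≠ nl then c + 1 else c) (some nl)
        simp only [List.filterMap_cons, h] at *
        rw [this]
        simp [pvPc]
        split_ifs <;> omega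

-- ===== VERDICT (by name: the statement is the Claim_ definition above) =====
theorem count_lead_changes_spec : Claim_equal_count_lead_changes := by
  intro sh _
  show count_lead_changes sh = count_lead_changes_alt sh
  unfold count_lead_changes count_lead_changes_alt
  rw [pvZipsum_eq_pc]
  split_ifs with h
  · simp [h, pvPc]
  · have := pvFold_eq sh 0 none
    simpa using this
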